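-- pv_equiv track=rewrite | github.com/csany2020c/MyGame | Algoritmusok/kiskornel.py | szamjegyekszorzata
-- ===== SOURCE A (Python) =====
-- from typing import List
--
-- def felbontas(sz: int) -> List['int']:
--     lista: List['int'] = []
--     if sz == 0:
--         lista.append(0)
--     while sz > 0:
--         lista.append(sz % 10)
--         sz = sz // 10
--     lista.reverse()
--     return lista
--
-- def szamjegyekszorzata(sz: int) -> bool:
--     szorzas: int = 1
--     for i in felbontas(sz):
--         szorzas*=i
--     if szorzas == sz:
--         return True
--     else:
--         return False
-- ===== SOURCE B (Python) =====
-- def szamjegyekszorzata(sz: int) -> bool: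
--     # Closed form: for sz >= 10 the product of digits is strictly less than sz
--     # (each digit is <= 9 while each place contributes a factor 10), so the
--     # product can equal sz only for single-digit nonnegative numbers; 0 counts
--     # because its digit list is [0] (product 0 == 0), and for negative sz the
--     # empty digit product 1 never equals sz.
--     return 0 <= sz <= 9
-- ===== Notes on version B (the rewrite author's own statement) =====
-- stated objective: simpler
-- what changed: Replaces the build-digit-list/reverse/multiply pipeline with the closed-form comparison 0 <= sz <= 9, justified by the proved fact that the digit product is strictly below sz whenever sz has two or more digits.
import Mathlib
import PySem

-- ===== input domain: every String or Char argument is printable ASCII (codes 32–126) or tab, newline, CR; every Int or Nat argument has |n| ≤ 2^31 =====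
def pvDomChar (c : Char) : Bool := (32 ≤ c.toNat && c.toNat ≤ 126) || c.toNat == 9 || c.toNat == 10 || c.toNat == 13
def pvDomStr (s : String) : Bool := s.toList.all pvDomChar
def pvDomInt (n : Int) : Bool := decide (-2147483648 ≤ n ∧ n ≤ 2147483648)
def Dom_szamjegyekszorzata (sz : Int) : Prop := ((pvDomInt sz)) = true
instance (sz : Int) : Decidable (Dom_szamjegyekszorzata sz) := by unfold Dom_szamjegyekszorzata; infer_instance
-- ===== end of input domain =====

-- B replaces A's build-digit-list/reverse/multiply pipeline with the closed form
-- 0 ≤ sz ≤ 9, correct because the digit product is strictly below sz for sz ≥ 10.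


-- ===== PORT A =====
-- while sz > 0: lista.append(sz % 10); sz = sz // 10
def felbontasLoop (sz : Int) (lista : List Int) : List Int :=
  if _h : sz > 0 then
    felbontasLoop (PySem.Int.floordiv sz 10) (lista ++ [PySem.Int.mod sz 10])
  else lista
termination_by sz.toNat
decreasing_by
  have h10 : PySem.Int.floordiv sz 10 = sz / 10 :=
    PySem.Int.floordiv_eq_ediv_of_pos (by omega)
  rw [h10]; omega

def felbontas (sz : Int) : List Int :=
  let lista : List Int := if sz = 0 then [0] else []
  (felbontasLoop sz lista).reverse

def szamjegyekszorzata (sz : Int) : Bool :=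
  let szorzas := (felbontas sz).foldl (fun acc i => acc * i) 1
  if szorzas = sz then true else false

-- ===== PORT B =====
def szamjegyekszorzata_alt (sz : Int) : Bool :=
  decide (0 ≤ sz ∧ sz ≤ 9)

-- ===== PRECONDITION & SPEC =====
def Spec_szamjegyekszorzata (sz : Int) (out : Bool) : Prop := out = szamjegyekszorzata_alt sz
instance (sz : Int) (out : Bool) : Decidable (Spec_szamjegyekszorzata sz out) := by unfold Spec_szamjegyekszorzata; infer_instance

-- ===== CLAIM (what is proved, stated in full; the proofs are below) =====
def Claim_equal_szamjegyekszorzata : Prop := ∀ (sz : Int), Dom_szamjegyekszorzata sz → Spec_szamjegyekszorzata sz (szamjegyekszorzata sz)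

-- ===== LEMMAS AND PROOFS =====

-- The A-side loop only ever appends: its result is the seed followed by the run from [].
theorem felbontasLoop_append_fuel (k : Nat) (sz : Int) (hk : sz.toNat ≤ k) (lista : List Int) :
    felbontasLoop sz lista = lista ++ felbontasLoop sz [] := by
  induction k generalizing sz lista with
  | zero =>
      have h : ¬ sz > 0 := by omega
      rw [felbontasLoop, dif_neg h, felbontasLoop, dif_neg h]; simp
  | succ k ih =>
      by_cases h : sz > 0
      · have hdiv : PySem.Int.floordiv sz 10 = sz / 10 :=
          PySem.Int.floordiv_eq_ediv_of_pos (by omega)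
        have hlt : (PySem.Int.floordiv sz 10).toNat ≤ k := by rw [hdiv]; omega
        conv_lhs => rw [felbontasLoop]
        conv_rhs => rw [felbontasLoop]
        rw [dif_pos h, dif_pos h,
          ih _ hlt (lista ++ [PySem.Int.mod sz 10]),
          ih _ hlt ([] ++ [PySem.Int.mod sz 10])]
        simp
      · rw [felbontasLoop, dif_neg h, felbontasLoop, dif_neg h]; simp

-- Peel one digit: for n > 0 the digit-list product factors as (n % 10) * product of n / 10.
theorem prod_peel (n : Int) (hn : n > 0) :
    (felbontasLoop n []).prod =
      PySem.Int.mod n 10 * (felbontasLoop (PySem.Int.floordiv n 10) []).prod := by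
  conv_lhs => rw [felbontasLoop, dif_pos hn]
  rw [felbontasLoop_append_fuel (PySem.Int.floordiv n 10).toNat _ le_rfl]
  simp

theorem prod_nonneg_fuel (k : Nat) (n : Int) (hk : n.toNat ≤ k) :
    0 ≤ (felbontasLoop n []).prod := by
  induction k generalizing n with
  | zero =>
      have h : ¬ n > 0 := by omega
      rw [felbontasLoop, dif_neg h]; simp
  | succ k ih =>
      by_cases h : n > 0
      · have hdiv : PySem.Int.floordiv n 10 = n / 10 :=
          PySem.Int.floordiv_eq_ediv_of_pos (by omega)
        have hmod : PySem.Int.mod n 10 = n % 10 :=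
          PySem.Int.mod_eq_emod_of_pos (by omega)
        rw [prod_peel n h]
        have h1 : 0 ≤ PySem.Int.mod n 10 := by rw [hmod]; omega
        have h2 : 0 ≤ (felbontasLoop (PySem.Int.floordiv n 10) []).prod :=
          ih _ (by rw [hdiv]; omega)
        positivity
      · rw [felbontasLoop, dif_neg h]; simp

-- A single digit is its own digit product.
theorem prod_single (n : Int) (h1 : 0 < n) (h9 : n ≤ 9) :
    (felbontasLoop n []).prod = n := by
  have hdiv : PySem.Int.floordiv n 10 = n / 10 :=
    PySem.Int.floordiv_eq_ediv_of_pos (by omega)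
  have hmod : PySem.Int.mod n 10 = n % 10 :=
    PySem.Int.mod_eq_emod_of_pos (by omega)
  rw [prod_peel n h1, hdiv, hmod]
  have hd0 : n / 10 = 0 := by omega
  have hm : n % 10 = n := by omega
  rw [hd0, hm, felbontasLoop, dif_neg (by omega : ¬ (0:Int) > 0)]
  simp

-- Key fact: for n ≥ 10 the digit product is strictly below n.
theorem prod_lt_fuel (k : Nat) (n : Int) (hk : n.toNat ≤ k) (hn : 10 ≤ n) :
    (felbontasLoop n []).prod < n := by
  induction k generalizing n with
  | zero => omega
  | succ k ih =>
      have hdiv : PySem.Int.floordiv n 10 = n / 10 :=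
        PySem.Int.floordiv_eq_ediv_of_pos (by omega)
      have hmod : PySem.Int.mod n 10 = n % 10 :=
        PySem.Int.mod_eq_emod_of_pos (by omega)
      rw [prod_peel n (by omega), hdiv, hmod]
      set m := n / 10 with hm
      have hm1 : 1 ≤ m := by omega
      have hmod9 : n % 10 ≤ 9 := by omega
      have hmod0 : 0 ≤ n % 10 := by omega
      have hnm : 10 * m ≤ n := by omega
      by_cases hms : m ≤ 9
      · rw [prod_single m (by omega) hms]
        nlinarith
      · have hP : (felbontasLoop m []).prod < m := ih m (by omega) (by omega)
        have hP0 : 0 ≤ (felbontasLoop m []).prod := prod_nonneg_fuel m.toNat m le_rfl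
        nlinarith

-- ===== VERDICT (by name: the statement is the Claim_ definition above) =====
theorem szamjegyekszorzata_spec : Claim_equal_szamjegyekszorzata := by
  intro sz _
  unfold Spec_szamjegyekszorzata szamjegyekszorzata szamjegyekszorzata_alt felbontas
  by_cases h0 : sz = 0
  · subst h0
    have hz : felbontasLoop 0 [0] = [0] := by
      rw [felbontasLoop, dif_neg (by omega : ¬ (0:Int) > 0)]
    simp [hz]
  · simp only [if_neg h0]
    rw [felbontasLoop_append_fuel sz.toNat _ le_rfl, List.nil_append,
      ← List.prod_eq_foldl, List.prod_reverse]
    by_cases hneg : sz < 0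
    · have hloop : felbontasLoop sz [] = [] := by
        rw [felbontasLoop, dif_neg (by omega)]
      rw [hloop]
      simp only [List.prod_nil]
      rw [if_neg (by omega)]
      exact (decide_eq_false (by omega)).symm
    · by_cases hsmall : sz ≤ 9
      · rw [prod_single sz (by omega) hsmall, if_pos rfl]
        exact (decide_eq_true (by omega)).symm
      · have hlt : (felbontasLoop sz []).prod < sz :=
          prod_lt_fuel sz.toNat sz le_rfl (by omega)
        rw [if_neg (by omega)]
        exact (decide_eq_false (by omega)).symm
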